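-- pv_equiv track=rewrite | github.com/bto174930/lista-de-exercicio- | shell.py | generate_hibbard_sequence
-- ===== SOURCE A (Python) =====
-- def generate_hibbard_sequence(n):
--     gaps = []
--     k = 1
--     while True:
--         gap = (1 << k) - 1
--         if gap >= n:
--             break
--         gaps.append(gap)
--         k += 1
--     return gaps
-- ===== SOURCE B (Python) =====
-- def generate_hibbard_sequence(n):
--     def down(g):
--         # g is a Hibbard gap (2^k - 1); halving gives the previous gap.
--         return [] if g < 1 else down(g >> 1) + [g]
--     if n < 2:
--         return []
--     # largest gap 2^k - 1 < n  <=>  2^k <= n  <=>  k = n.bit_length() - 1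
--     return down((1 << (n.bit_length() - 1)) - 1)
-- ===== Notes on version B (the rewrite author's own statement) =====
-- stated objective: alternative
-- what changed: B replaces A's bottom-up doubling trial loop (test each gap 2^k-1 against n, appending) by computing the largest Hibbard gap below n in closed form from bit_length and then generating the list recursively top-down by halving (g >> 1 maps 2^k-1 to 2^(k-1)-1), building the result back-to-front.
import Mathlib
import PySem

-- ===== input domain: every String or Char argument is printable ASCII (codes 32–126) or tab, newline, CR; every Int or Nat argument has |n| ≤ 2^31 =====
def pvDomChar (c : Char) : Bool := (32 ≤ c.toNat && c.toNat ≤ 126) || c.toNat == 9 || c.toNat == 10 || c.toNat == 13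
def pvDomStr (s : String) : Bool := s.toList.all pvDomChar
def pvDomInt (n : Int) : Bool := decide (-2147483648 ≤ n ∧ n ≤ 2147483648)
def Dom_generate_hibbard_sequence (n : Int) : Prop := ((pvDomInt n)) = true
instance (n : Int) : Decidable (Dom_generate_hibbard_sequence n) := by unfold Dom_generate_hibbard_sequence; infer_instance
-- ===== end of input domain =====

-- B computes the largest Hibbard gap below n in closed form (bit_length) and generates the
-- sequence top-down by halving, recursively and back-to-front, instead of A's bottom-up
-- doubling trial loop; same cost (objective: alternative).


-- ===== PORT A =====
-- A's 'while True' loop: k counts up, gap = 2^k - 1, break when gap ≥ n.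
def hibLoop (n : Int) (k : Nat) (gaps : List Int) : List Int :=
  let gap : Int := 2 ^ k - 1
  if gap ≥ n then gaps
  else hibLoop n (k + 1) (gaps ++ [gap])
termination_by n.toNat + 1 - 2 ^ k
decreasing_by
  rename_i h
  have h1 : (2 : Int) ^ k ≤ n := by omega
  have h2 : 2 ^ k ≤ n.toNat := by
    have : ((2 ^ k : Nat) : Int) ≤ n := by push_cast; exact h1
    omega
  have h3 : 2 ^ k < 2 ^ (k + 1) := Nat.pow_lt_pow_right (by omega) (Nat.lt_succ_self k)
  omega

def generate_hibbard_sequence (n : Int) : List Int := hibLoop n 1 []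

-- ===== PORT B =====
-- Source B's helper down(g): recursive halving descent, list built back-to-front.
def hibDown (g : Int) : List Int :=
  if g < 1 then [] else hibDown (PySem.Int.floordiv g 2) ++ [g]
termination_by g.toNat
decreasing_by
  rename_i h
  have := PySem.Int.floordiv_eq_ediv_of_pos (a := g) (b := 2) (by omega)
  omega

-- n.bit_length() for n ≥ 2 is Nat.log2 n.toNat + 1; (1 << k) - 1 is 2^k - 1.
def generate_hibbard_sequence_alt (n : Int) : List Int :=
  if n < 2 then []
  else hibDown (2 ^ Nat.log2 n.toNat - 1)

-- ===== PRECONDITION & SPEC =====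
def Spec_generate_hibbard_sequence (n : Int) (out : List Int) : Prop := out = generate_hibbard_sequence_alt n
instance (n : Int) (out : List Int) : Decidable (Spec_generate_hibbard_sequence n out) := by unfold Spec_generate_hibbard_sequence; infer_instance

-- ===== CLAIM =====
def Claim_equal_generate_hibbard_sequence : Prop := ∀ (n : Int), Dom_generate_hibbard_sequence n → Spec_generate_hibbard_sequence n (generate_hibbard_sequence n)

-- ===== LEMMAS AND PROOFS =====

-- A's loop, characterised: it appends 2^j - 1 for j = k .. log2 n.toNat.
theorem hibLoop_eq (n : Int) (hn : 2 ≤ n) : ∀ (k : Nat) (acc : List Int),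
    hibLoop n k acc
      = acc ++ (PySem.List.pyRange (k : Int) ((Nat.log2 n.toNat : Int) + 1) 1).map
          (fun j => 2 ^ j.toNat - 1) := by
  intro k acc
  induction k, acc using hibLoop.induct n with
  | case1 k acc gap hge =>
    have h1 : n < (2 : Int) ^ k := by simp only [gap] at hge; omega
    have h2 : n.toNat < 2 ^ k := by
      have : n < ((2 ^ k : Nat) : Int) := by push_cast; exact h1
      omega
    have h3 : Nat.log2 n.toNat < k := (Nat.log2_lt (by omega)).mpr h2
    rw [hibLoop]
    simp only [gap, if_pos hge]
    rw [PySem.List.pyRange_one]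
    have : ((Nat.log2 n.toNat : Int) + 1 - k).toNat = 0 := by omega
    simp [this]
  | case2 k acc gap hlt ih =>
    have h1 : (2 : Int) ^ k ≤ n := by simp only [gap] at hlt; omega
    have h2 : 2 ^ k ≤ n.toNat := by
      have : ((2 ^ k : Nat) : Int) ≤ n := by push_cast; exact h1
      omega
    have h3 : ¬ Nat.log2 n.toNat < k := by
      intro h
      exact absurd h2 (by simpa using Nat.not_le.mpr ((Nat.log2_lt (by omega)).mp h))
    have hk : (k : Int) < (Nat.log2 n.toNat : Int) + 1 := by omega
    rw [hibLoop]
    simp only [if_neg (by omega : ¬ (2 : Int) ^ k - 1 ≥ n)]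
    rw [ih, PySem.List.pyRange_one_cons hk]
    simp [gap]

-- B's halving descent, characterised the same way: hibDown (2^L - 1) lists 2^j - 1 for j = 1 .. L.
theorem hibDown_eq : ∀ (L : Nat),
    hibDown ((2 : Int) ^ L - 1)
      = (PySem.List.pyRange 1 ((L : Int) + 1) 1).map (fun j => 2 ^ j.toNat - 1) := by
  intro L
  induction L with
  | zero =>
    rw [hibDown]
    simp [PySem.List.pyRange_one_eq_nil (le_refl (1:Int))]
  | succ L ih =>
    have hp : (0 : Int) < 2 ^ L := by positivity
    have he : (2 : Int) ^ (L + 1) = 2 * 2 ^ L := by ring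
    have hhalf : PySem.Int.floordiv ((2 : Int) ^ (L + 1) - 1) 2 = 2 ^ L - 1 := by
      rw [PySem.Int.floordiv_eq_ediv_of_pos (by omega)]
      have : (2 : Int) ^ (L + 1) - 1 = (2 ^ L - 1) * 2 + 1 := by ring
      omega
    rw [hibDown, if_neg (by omega), hhalf, ih]
    have hc : ((L + 1 : Nat) : Int) = (L : Int) + 1 := by push_cast; ring
    rw [hc, PySem.List.pyRange_one_succ_right (by omega : (1 : Int) ≤ (L : Int) + 1)]
    simp

-- ===== VERDICT =====
theorem generate_hibbard_sequence_spec : Claim_equal_generate_hibbard_sequence := by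
  intro n _
  unfold Spec_generate_hibbard_sequence generate_hibbard_sequence generate_hibbard_sequence_alt
  by_cases h : n < 2
  · rw [if_pos h, hibLoop]
    simp
    omega
  · rw [if_neg h, hibLoop_eq n (by omega), hibDown_eq]
    simp
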